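-- pv_equiv track=rewrite | github.com/YuriHe/review_basic | 1710. Maximum Units on a Truck.py | maximumUnits
-- ===== SOURCE A (Python) =====
-- from typing import List
--
-- def maximumUnits(boxTypes: List[List[int]], truckSize: int) -> int:
--     # # 1SOLUTION: sort+greedy+nested loop
--     res = 0
--     # sort based on unit
--     boxTypes.sort(key=lambda x: -x[1])
--
--     # used box 0 to truckSize or cur box
--     used = 0
--     for part in boxTypes:
--         box = part[0]
--         unit = part[1]
--         cur = box
--         while used < truckSize and cur > 0:
--             res += unit
--             cur -= 1
--             used += 1
--     return res
--
--     # 2SOLUTION: sort+greedy+one pass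
--     res = 0
--     # sort based on unit
--     boxTypes.sort(key=lambda x: -x[1])
--
--     # used box 0 to truckSize or cur box
--     used = 0
--     for box, unit in boxTypes:
--         if box < truckSize:
--             res += box * unit
--             truckSize -= box
--         else:
--             res += truckSize * unit
--             return res
--     return res
-- ===== SOURCE B (Python) =====
-- from typing import List
--
-- def maximumUnits(boxTypes: List[List[int]], truckSize: int) -> int:
--     # one pass over the boxes sorted by unit descending; clamp each take to the
--     # remaining capacity instead of loading item by item
--     res = 0
--     remaining = truckSize
--     for part in sorted(boxTypes, key=lambda x: -x[1]):
--         take = min(part[0], remaining)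
--         if take > 0:
--             res += take * part[1]
--             remaining -= take
--     return res
-- ===== Notes on version B (the rewrite author's own statement) =====
-- stated objective: faster
-- what changed: A loads the truck one item at a time in an inner while loop over each box; B computes each box's clamped contribution min(box, remaining) in a single arithmetic step per box, so the inner loop disappears.
import Mathlib
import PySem

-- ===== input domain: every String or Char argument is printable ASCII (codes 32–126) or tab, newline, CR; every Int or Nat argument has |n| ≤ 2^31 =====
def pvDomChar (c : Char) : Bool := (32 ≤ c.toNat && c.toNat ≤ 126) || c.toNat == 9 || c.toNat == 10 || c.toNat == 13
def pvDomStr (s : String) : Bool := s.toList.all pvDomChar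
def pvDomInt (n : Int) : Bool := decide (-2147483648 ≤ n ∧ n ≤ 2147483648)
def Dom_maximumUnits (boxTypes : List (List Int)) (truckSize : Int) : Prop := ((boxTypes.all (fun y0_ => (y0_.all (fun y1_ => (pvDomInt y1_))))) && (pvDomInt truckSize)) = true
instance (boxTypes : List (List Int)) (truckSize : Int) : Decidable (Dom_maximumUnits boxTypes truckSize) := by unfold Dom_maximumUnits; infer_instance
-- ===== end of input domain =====

-- B replaces A's item-by-item inner while loop by a single clamped take per box
-- (one pass after sorting); equivalence is about the RETURN value only — A sorts
-- boxTypes in place, B does not mutate its argument.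

-- ===== PORT A =====
-- the inner 'while used < truckSize and cur > 0' loop, state (res, used, cur)
def pvWhileA (truckSize unit : Int) (res used cur : Int) : Int × Int :=
  if used < truckSize ∧ 0 < cur then
    pvWhileA truckSize unit (res + unit) (used + 1) (cur - 1)
  else (res, used)
termination_by cur.toNat
decreasing_by omega

def maximumUnits (boxTypes : List (List Int)) (truckSize : Int) : Int :=
  let sortedBoxes := PySem.List.sorted boxTypes (fun x => -(PySem.List.pyGetD x 1 0)) false
  (sortedBoxes.foldl (fun (st : Int × Int) part =>
      let box := PySem.List.pyGetD part 0 0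
      let unit := PySem.List.pyGetD part 1 0
      pvWhileA truckSize unit st.1 st.2 box) (0, 0)).1

-- ===== PORT B =====
def maximumUnits_alt (boxTypes : List (List Int)) (truckSize : Int) : Int :=
  (PySem.List.sorted boxTypes (fun x => -(PySem.List.pyGetD x 1 0)) false).foldl
    (fun (st : Int × Int) part =>
      let take := min (PySem.List.pyGetD part 0 0) st.2
      if 0 < take then (st.1 + take * PySem.List.pyGetD part 1 0, st.2 - take) else st)
    (0, truckSize) |>.1

-- ===== PRECONDITION & SPEC =====
-- Pre_ excludes only inputs where A raises IndexError (a box entry shorter than two elements).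
def Pre_maximumUnits (boxTypes : List (List Int)) (truckSize : Int) : Prop :=
  ∀ part ∈ boxTypes, 2 ≤ part.length
instance (boxTypes : List (List Int)) (truckSize : Int) : Decidable (Pre_maximumUnits boxTypes truckSize) := by
  unfold Pre_maximumUnits; infer_instance

def pvWitness_maximumUnits : List (List Int) × Int := ([[1, 3], [2, 2], [3, 1]], 4)

def Spec_maximumUnits (boxTypes : List (List Int)) (truckSize : Int) (out : Int) : Prop := out = maximumUnits_alt boxTypes truckSize
instance (boxTypes : List (List Int)) (truckSize : Int) (out : Int) : Decidable (Spec_maximumUnits boxTypes truckSize out) := by unfold Spec_maximumUnits; infer_instance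

-- ===== CLAIM (what is proved, stated in full; the proofs are below) =====
def Claim_equal_maximumUnits : Prop := ∀ (boxTypes : List (List Int)) (truckSize : Int), Dom_maximumUnits boxTypes truckSize → Pre_maximumUnits boxTypes truckSize → Spec_maximumUnits boxTypes truckSize (maximumUnits boxTypes truckSize)

-- ===== LEMMAS AND PROOFS =====

-- closed form of the inner while loop: it loads max 0 (min cur (truckSize - used)) items
theorem pvWhileA_closed (truckSize unit : Int) :
    ∀ (n : Nat) (cur : Int), cur.toNat ≤ n → ∀ res used : Int,
      pvWhileA truckSize unit res used cur =
      (res + max 0 (min cur (truckSize - used)) * unit,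
       used + max 0 (min cur (truckSize - used))) := by
  intro n
  induction n with
  | zero =>
    intro cur hc res used
    rw [pvWhileA]
    have h0 : cur ≤ 0 := by omega
    have : ¬ (used < truckSize ∧ 0 < cur) := by omega
    rw [if_neg this]
    have ht : max 0 (min cur (truckSize - used)) = 0 := by omega
    rw [ht]; ring_nf
  | succ n ih =>
    intro cur hc res used
    rw [pvWhileA]
    by_cases h : used < truckSize ∧ 0 < cur
    · rw [if_pos h]
      rw [ih (cur - 1) (by omega)]
      have ht : max 0 (min (cur - 1) (truckSize - (used + 1)))
          = max 0 (min cur (truckSize - used)) - 1 := by omega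
      rw [ht]
      exact Prod.ext (by ring) (by ring)
    · rw [if_neg h]
      have ht : max 0 (min cur (truckSize - used)) = 0 := by omega
      rw [ht]; ring_nf

-- the two folds agree when B's remaining capacity mirrors A's used count
theorem pvFold_agree (truckSize : Int) :
    ∀ (l : List (List Int)) (res used remaining : Int), remaining = truckSize - used →
      (l.foldl (fun (st : Int × Int) part =>
          let box := PySem.List.pyGetD part 0 0
          let unit := PySem.List.pyGetD part 1 0
          pvWhileA truckSize unit st.1 st.2 box) (res, used)).1 =
      (l.foldl (fun (st : Int × Int) part =>
          let take := min (PySem.List.pyGetD part 0 0) st.2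
          if 0 < take then (st.1 + take * PySem.List.pyGetD part 1 0, st.2 - take) else st)
        (res, remaining)).1 := by
  intro l
  induction l with
  | nil => intro res used remaining h; rfl
  | cons part rest ih =>
    intro res used remaining h
    simp only [List.foldl_cons]
    rw [pvWhileA_closed truckSize (PySem.List.pyGetD part 1 0)
        (PySem.List.pyGetD part 0 0).toNat (PySem.List.pyGetD part 0 0) (le_refl _)]
    by_cases hp : 0 < min (PySem.List.pyGetD part 0 0) remaining
    · rw [if_pos hp]
      have ht : max 0 (min (PySem.List.pyGetD part 0 0) (truckSize - used))
          = min (PySem.List.pyGetD part 0 0) remaining := by omega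
      rw [ht]
      exact ih _ _ _ (by omega)
    · rw [if_neg hp]
      have ht : max 0 (min (PySem.List.pyGetD part 0 0) (truckSize - used)) = 0 := by omega
      rw [ht]
      simpa using ih res used remaining h

-- ===== VERDICT (by name: the statement is the Claim_ definition above) =====
theorem maximumUnits_spec : Claim_equal_maximumUnits := by
  intro boxTypes truckSize _ _
  unfold Spec_maximumUnits maximumUnits maximumUnits_alt
  exact pvFold_agree truckSize _ 0 0 truckSize (by ring)
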